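-- pv_equiv track=rewrite | github.com/jason-leeee/adventofcode2020 | Day6/solver.py | solution
-- ===== SOURCE A (Python) =====
-- def solution(lines):
--     groups = []
--     s = ""
--     for line in lines:
--         if line:
--             s += line
--         else:
--             groups.append(set(s))
--             s = ""
--     groups.append(set(s))
--
--     total_valid = 0
--     for group in groups:
--         total_valid += len(group)
--
--     return total_valid
-- ===== SOURCE B (Python) =====
-- def solution(lines):
--     # Two-pointer scan: skip blank lines, consume each maximal run of
--     # non-blank lines into one set, add its size. No flush-at-end step
--     # and no empty-group entries are ever created.
--     total = 0
--     i = 0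
--     n = len(lines)
--     while i < n:
--         line = lines[i]
--         if line:
--             chars = set(line)
--             i += 1
--             while i < n and lines[i]:
--                 chars.update(lines[i])
--                 i += 1
--             total += len(chars)
--         else:
--             i += 1
--     return total
-- ===== Notes on version B (the rewrite author's own statement) =====
-- stated objective: alternative
-- what changed: Replaces A's accumulate-into-a-string-and-flush pass (which builds a list of per-group sets, including empty ones, then sums their sizes in a second loop) with a single two-pointer scan that skips blank lines and consumes each maximal run of non-blank lines directly into a character set, adding its size on the spot; no concatenated string, no group list, no final flush.
import Mathlib
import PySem

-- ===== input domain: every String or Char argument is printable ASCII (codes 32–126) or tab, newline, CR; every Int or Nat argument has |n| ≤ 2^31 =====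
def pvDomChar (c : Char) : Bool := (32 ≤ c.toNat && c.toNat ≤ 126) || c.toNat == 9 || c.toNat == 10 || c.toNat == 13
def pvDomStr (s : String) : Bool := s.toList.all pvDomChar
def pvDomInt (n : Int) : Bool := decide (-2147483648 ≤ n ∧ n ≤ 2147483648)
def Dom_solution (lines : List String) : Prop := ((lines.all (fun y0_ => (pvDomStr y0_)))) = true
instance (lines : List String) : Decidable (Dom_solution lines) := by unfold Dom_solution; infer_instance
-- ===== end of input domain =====

-- B replaces A's accumulate-and-flush pass (per-group sets collected, then summed)
-- with a single two-pointer scan that skips blanks and sums each run's set size directly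
-- (objective: alternative, same cost).


-- ===== PORT A =====
-- A: fold over lines building (groups, s); blank line flushes set(s); final flush; then sum lens.
def solution (lines : List String) : Int :=
  let p := lines.foldl
    (fun (p : List (PySem.Set Char) × List Char) line =>
      if line = "" then (p.1 ++ [PySem.Set.ofList p.2], []) else (p.1, p.2 ++ line.toList))
    ([], [])
  let groups := p.1 ++ [PySem.Set.ofList p.2]
  groups.foldl (fun total_valid group => total_valid + PySem.Set.len group) 0

-- ===== PORT B =====
-- B's two index-advancing while loops become two mutually structural passes over the
-- remaining lines: bScan skips blanks, bGroup consumes the current non-blank run.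
mutual
def bScan : List String → Int
  | [] => 0
  | line :: rest =>
      if line = "" then bScan rest
      else bGroup (PySem.Set.ofList line.toList) rest

def bGroup (chars : PySem.Set Char) : List String → Int
  | [] => PySem.Set.len chars
  | line :: rest =>
      if line = "" then PySem.Set.len chars + bScan rest
      else bGroup (PySem.Set.update chars line.toList) rest
end

def solution_alt (lines : List String) : Int := bScan lines

-- ===== PRECONDITION & SPEC =====
def Spec_solution (lines : List String) (out : Int) : Prop := out = solution_alt lines
instance (lines : List String) (out : Int) : Decidable (Spec_solution lines out) := by unfold Spec_solution; infer_instance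

-- ===== CLAIM (what is proved, stated in full; the proofs are below) =====
def Claim_equal_solution : Prop := ∀ (lines : List String), Dom_solution lines → Spec_solution lines (solution lines)

-- ===== LEMMAS AND PROOFS =====

-- reference: total for the remaining lines given the characters accumulated so far
def href : List String → List Char → Int
  | [], s => PySem.Set.len (PySem.Set.ofList s)
  | line :: rest, s =>
      if line = "" then PySem.Set.len (PySem.Set.ofList s) + href rest []
      else href rest (s ++ line.toList)

theorem foldl_len_add (gs : List (PySem.Set Char)) (c : Int) :
    gs.foldl (fun t g => t + PySem.Set.len g) c = c + (gs.map PySem.Set.len).sum := by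
  induction gs generalizing c with
  | nil => simp
  | cons g gs ih => rw [List.foldl_cons, ih]; simp; ring

theorem a_loop (lines : List String) (gs : List (PySem.Set Char)) (s : List Char) :
    (((lines.foldl
        (fun (p : List (PySem.Set Char) × List Char) line =>
          if line = "" then (p.1 ++ [PySem.Set.ofList p.2], []) else (p.1, p.2 ++ line.toList))
        (gs, s)).1 ++ [PySem.Set.ofList (lines.foldl
        (fun (p : List (PySem.Set Char) × List Char) line =>
          if line = "" then (p.1 ++ [PySem.Set.ofList p.2], []) else (p.1, p.2 ++ line.toList))
        (gs, s)).2]).map PySem.Set.len).sum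
      = (gs.map PySem.Set.len).sum + href lines s := by
  induction lines generalizing gs s with
  | nil => simp [href, PySem.Set.len]
  | cons line rest ih =>
      by_cases h : line = "" <;>
        simp only [List.foldl_cons, h, href, ↓reduceIte]
      · rw [ih]; simp; ring
      · rw [ih]

theorem b_eq_href (lines : List String) :
    (∀ s : List Char, bGroup (PySem.Set.ofList s) lines = href lines s) ∧
      bScan lines = href lines [] := by
  induction lines with
  | nil =>
      refine ⟨fun s => rfl, ?_⟩
      simp [bScan, href, PySem.Set.len, PySem.Set.ofList]
  | cons line rest ih =>
      by_cases h : line = ""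
      · refine ⟨fun s => ?_, ?_⟩
        · simp [bGroup, h, href, ih.2]
        · simp [bScan, h, href, ih.2, PySem.Set.len, PySem.Set.ofList]
      · refine ⟨fun s => ?_, ?_⟩
        · simp [bGroup, h, href, ← PySem.Set.ofList_append, ih.1]
        · simpa [bScan, h, href] using ih.1 line.toList

-- ===== VERDICT (by name: the statement is the Claim_ definition above) =====
theorem solution_spec : Claim_equal_solution := by
  intro lines _
  show solution lines = solution_alt lines
  unfold solution solution_alt
  rw [foldl_len_add, a_loop]
  simp [(b_eq_href lines).2]
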